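-- pv_equiv track=rewrite | github.com/aidsuu/penq-pennylane | lattice_geometry_utils.py | cubic_y_pairs
-- ===== SOURCE A (Python) =====
-- def cubic_site_index(x, y, z, Lx, Ly, Lz):
--     if Lx < 1 or Ly < 1 or Lz < 1:
--         raise ValueError("Lx, Ly, and Lz must be positive integers.")
--     if x < 0 or y < 0 or z < 0 or x >= Lx or y >= Ly or z >= Lz:
--         raise ValueError("cubic_site_index received out-of-range coordinates.")
--     return int(x + Lx * y + Lx * Ly * z)
--
-- def cubic_y_pairs(Lx, Ly, Lz):
--     if Lx < 1 or Ly < 1 or Lz < 1: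
--         raise ValueError("Lx, Ly, and Lz must be positive integers.")
--     pairs = []
--     for z in range(Lz):
--         for y in range(Ly - 1):
--             for x in range(Lx):
--                 lower = cubic_site_index(x, y, z, Lx, Ly, Lz)
--                 upper = cubic_site_index(x, y + 1, z, Lx, Ly, Lz)
--                 pairs.append((lower, upper))
--     return pairs
-- ===== SOURCE B (Python) =====
-- def cubic_y_pairs(Lx, Ly, Lz):
--     if Lx < 1 or Ly < 1 or Lz < 1:
--         raise ValueError("Lx, Ly, and Lz must be positive integers.")
--     pairs = []
--     for s in range(Lx * Ly * Lz):
--         if (s // Lx) % Ly < Ly - 1: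
--             pairs.append((s, s + Lx))
--     return pairs
-- ===== Notes on version B (the rewrite author's own statement) =====
-- stated objective: alternative
-- what changed: Replaces the three nested coordinate loops (with per-site index computation via a checked helper) by a single flat loop over all site indices that recovers the y-coordinate arithmetically as (s//Lx)%Ly and emits (s, s+Lx) when y is not on the upper boundary.
import Mathlib
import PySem

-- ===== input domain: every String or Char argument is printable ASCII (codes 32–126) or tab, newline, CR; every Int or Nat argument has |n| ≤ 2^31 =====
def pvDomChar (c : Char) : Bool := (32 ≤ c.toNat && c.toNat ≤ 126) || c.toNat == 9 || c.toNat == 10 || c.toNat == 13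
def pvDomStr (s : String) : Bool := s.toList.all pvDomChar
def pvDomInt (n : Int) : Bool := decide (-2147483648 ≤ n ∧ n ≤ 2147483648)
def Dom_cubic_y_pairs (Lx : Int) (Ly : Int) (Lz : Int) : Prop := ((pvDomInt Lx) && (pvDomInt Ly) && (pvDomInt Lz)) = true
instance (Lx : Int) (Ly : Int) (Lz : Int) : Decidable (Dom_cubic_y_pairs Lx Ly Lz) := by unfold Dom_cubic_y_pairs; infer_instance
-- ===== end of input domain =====

-- B replaces A's triple nest + checked index helper by one flat loop with arithmetic
-- coordinate recovery ((s//Lx)%Ly); equivalence is proved on positive dimensions (Pre_).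

-- ===== PORT A =====
-- cubic_site_index: none = ValueError; under Pre_ the loops only call it in range, so it is always some.
def cubic_site_index (x y z Lx Ly Lz : Int) : Option Int :=
  if Lx < 1 ∨ Ly < 1 ∨ Lz < 1 then none
  else if x < 0 ∨ y < 0 ∨ z < 0 ∨ x ≥ Lx ∨ y ≥ Ly ∨ z ≥ Lz then none
  else some (x + Lx * y + Lx * Ly * z)

def cubic_y_pairs (Lx : Int) (Ly : Int) (Lz : Int) : List (Int × Int) :=
  if Lx < 1 ∨ Ly < 1 ∨ Lz < 1 then []   -- Python raises ValueError here; excluded by Pre_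
  else
    (PySem.List.pyRange 0 Lz 1).foldl (fun pairs z =>
      (PySem.List.pyRange 0 (Ly - 1) 1).foldl (fun pairs y =>
        (PySem.List.pyRange 0 Lx 1).foldl (fun pairs x =>
          pairs ++ [((cubic_site_index x y z Lx Ly Lz).getD 0,
                     (cubic_site_index x (y + 1) z Lx Ly Lz).getD 0)]) pairs) pairs) []

-- ===== PORT B =====
def cubic_y_pairs_alt (Lx : Int) (Ly : Int) (Lz : Int) : List (Int × Int) :=
  if Lx < 1 ∨ Ly < 1 ∨ Lz < 1 then []   -- Python raises ValueError here; excluded by Pre_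
  else
    (PySem.List.pyRange 0 (Lx * Ly * Lz) 1).foldl (fun pairs s =>
      if PySem.Int.mod (PySem.Int.floordiv s Lx) Ly < Ly - 1 then pairs ++ [(s, s + Lx)]
      else pairs) []

-- ===== PRECONDITION & SPEC =====
-- Pre_ excludes exactly the inputs on which Python A raises ValueError (a non-positive dimension).
def Pre_cubic_y_pairs (Lx : Int) (Ly : Int) (Lz : Int) : Prop := 1 ≤ Lx ∧ 1 ≤ Ly ∧ 1 ≤ Lz
instance (Lx : Int) (Ly : Int) (Lz : Int) : Decidable (Pre_cubic_y_pairs Lx Ly Lz) := by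
  unfold Pre_cubic_y_pairs; infer_instance
def pvWitness_cubic_y_pairs : Int × Int × Int := (2, 3, 2)

def Spec_cubic_y_pairs (Lx : Int) (Ly : Int) (Lz : Int) (out : List (Int × Int)) : Prop :=
  out = cubic_y_pairs_alt Lx Ly Lz
instance (Lx : Int) (Ly : Int) (Lz : Int) (out : List (Int × Int)) : Decidable (Spec_cubic_y_pairs Lx Ly Lz out) := by
  unfold Spec_cubic_y_pairs; infer_instance

-- ===== CLAIM (what is proved, stated in full; the proofs are below) =====
def Claim_equal_cubic_y_pairs : Prop := ∀ (Lx : Int) (Ly : Int) (Lz : Int),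
  Dom_cubic_y_pairs Lx Ly Lz → Pre_cubic_y_pairs Lx Ly Lz →
  Spec_cubic_y_pairs Lx Ly Lz (cubic_y_pairs Lx Ly Lz)

-- ===== LEMMAS AND PROOFS =====

-- generic loop shape: a foldl whose body appends a block is a flatMap
theorem foldl_nest {α β : Type} (l : List α) (g : List β → α → List β) (h : α → List β)
    (hg : ∀ acc x, g acc x = acc ++ h x) : ∀ acc, l.foldl g acc = acc ++ l.flatMap h := by
  induction l with
  | nil => intro acc; simp
  | cons a t ih => intro acc; simp [List.foldl_cons, hg, ih]

-- block decomposition of a flat Nat range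
theorem range_mul_flatMap {α : Type} (n m : ℕ) (f : ℕ → List α) :
    (List.range (n * m)).flatMap f
      = (List.range n).flatMap (fun j => (List.range m).flatMap (fun i => f (j * m + i))) := by
  induction n with
  | zero => simp
  | succ n ih =>
    have h : (n + 1) * m = n * m + m := by ring
    rw [h, List.range_add, List.flatMap_append, ih, List.range_succ, List.flatMap_append]
    simp [List.flatMap_map]

-- ===== VERDICT =====
theorem cubic_y_pairs_spec : Claim_equal_cubic_y_pairs := by
  intro Lx Ly Lz _ hPre
  obtain ⟨hx, hy, hz⟩ := hPre
  obtain ⟨a, ha⟩ : ∃ a : ℕ, Lx = (a : ℤ) := ⟨Lx.toNat, (Int.toNat_of_nonneg (by omega)).symm⟩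
  obtain ⟨b, hb⟩ : ∃ b : ℕ, Ly = (b : ℤ) := ⟨Ly.toNat, (Int.toNat_of_nonneg (by omega)).symm⟩
  obtain ⟨c, hc⟩ : ∃ c : ℕ, Lz = (c : ℤ) := ⟨Lz.toNat, (Int.toNat_of_nonneg (by omega)).symm⟩
  subst ha hb hc
  have ha1 : 1 ≤ a := by exact_mod_cast hx
  have hb1 : 1 ≤ b := by exact_mod_cast hy
  have hc1 : 1 ≤ c := by exact_mod_cast hz
  have hguard : ¬((a : ℤ) < 1 ∨ (b : ℤ) < 1 ∨ (c : ℤ) < 1) := by push_neg; omega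
  unfold Spec_cubic_y_pairs cubic_y_pairs cubic_y_pairs_alt
  rw [if_neg hguard, if_neg hguard]
  -- A's nested folds become nested flatMaps
  rw [foldl_nest _ _
        (fun z => (PySem.List.pyRange 0 ((b : ℤ) - 1)).flatMap fun y =>
          (PySem.List.pyRange 0 (a : ℤ)).flatMap fun x =>
            [((cubic_site_index x y z a b c).getD 0, (cubic_site_index x (y + 1) z a b c).getD 0)])
        (fun acc z => by
          rw [foldl_nest _ _
                (fun y => (PySem.List.pyRange 0 (a : ℤ)).flatMap fun x =>
                  [((cubic_site_index x y z a b c).getD 0, (cubic_site_index x (y + 1) z a b c).getD 0)])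
                (fun acc y => by
                  rw [foldl_nest _ _
                        (fun x => [((cubic_site_index x y z a b c).getD 0,
                                    (cubic_site_index x (y + 1) z a b c).getD 0)])
                        (fun acc x => rfl)])])]
  -- B's flat fold becomes one flatMap
  rw [foldl_nest _ _
        (fun s => if PySem.Int.mod (PySem.Int.floordiv s a) b < (b : ℤ) - 1 then [(s, s + (a : ℤ))] else [])
        (fun acc s => by by_cases h : PySem.Int.mod (PySem.Int.floordiv s a) b < (b : ℤ) - 1 <;> simp [h])]
  simp only [List.nil_append]
  -- switch to Nat ranges
  have hb' : ((b : ℤ) - 1) = ((b - 1 : ℕ) : ℤ) := by omega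
  have hN : ((a : ℤ) * b * c) = ((a * b * c : ℕ) : ℤ) := by push_cast; ring
  rw [hb', hN, PySem.List.pyRange_zero_nat, PySem.List.pyRange_zero_nat,
      PySem.List.pyRange_zero_nat, PySem.List.pyRange_zero_nat]
  simp only [List.flatMap_map]
  -- decompose B's flat range into z-blocks and y-rows
  have hmul : a * b * c = c * (b * a) := by ring
  rw [hmul, range_mul_flatMap]
  refine List.flatMap_congr (fun z hz' => ?_)
  have hzc : z < c := List.mem_range.mp hz'
  rw [range_mul_flatMap]
  -- A's y-range is range (b-1); B's is range b, whose last row contributes nothing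
  have hbsplit : List.range b = List.range (b - 1) ++ [b - 1] := by
    conv_lhs => rw [show b = (b - 1) + 1 by omega]
    exact List.range_succ
  rw [hbsplit, List.flatMap_append]
  simp only [List.flatMap_cons, List.flatMap_nil, List.append_nil]
  have key : ∀ y i : ℕ, i < a →
      PySem.Int.mod (PySem.Int.floordiv ((z * (b * a) + (y * a + i) : ℕ) : ℤ) a) b
        = ((y % b : ℕ) : ℤ) := by
    intro y i hi
    have hs : z * (b * a) + (y * a + i) = i + (z * b + y) * a := by ring
    rw [hs, PySem.Int.floordiv_natCast, Nat.add_mul_div_right _ _ (by omega : 0 < a),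
        Nat.div_eq_of_lt hi, PySem.Int.mod_natCast]
    congr 1
    simp [Nat.mul_add_mod]
  have hlast : (List.range a).flatMap (fun i =>
      if PySem.Int.mod (PySem.Int.floordiv ((z * (b * a) + ((b - 1) * a + i) : ℕ) : ℤ) a) b
          < ((b - 1 : ℕ) : ℤ)
        then [(((z * (b * a) + ((b - 1) * a + i) : ℕ) : ℤ),
               ((z * (b * a) + ((b - 1) * a + i) : ℕ) : ℤ) + (a : ℤ))] else []) = [] := by
    refine List.flatMap_eq_nil_iff.mpr (fun i hi => ?_)
    have hia : i < a := List.mem_range.mp hi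
    rw [key (b - 1) i hia, if_neg]
    rw [Nat.mod_eq_of_lt (by omega : b - 1 < b)]
    omega
  rw [hlast, List.append_nil]
  refine List.flatMap_congr (fun y hy' => ?_)
  have hyb : y < b - 1 := List.mem_range.mp hy'
  refine List.flatMap_congr (fun x hx' => ?_)
  have hxa : x < a := List.mem_range.mp hx'
  rw [key y x hxa, if_pos (by rw [Nat.mod_eq_of_lt (by omega : y < b)]; omega)]
  have hsite1 : cubic_site_index x y z a b c
      = some ((x : ℤ) + a * y + a * b * z) := by
    unfold cubic_site_index
    rw [if_neg hguard, if_neg (by push_neg; push_cast; omega)]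
  have hsite2 : cubic_site_index x ((y : ℤ) + 1) z a b c
      = some ((x : ℤ) + a * ((y : ℤ) + 1) + a * b * z) := by
    unfold cubic_site_index
    rw [if_neg hguard, if_neg (by push_neg; push_cast; omega)]
  rw [hsite1, hsite2]
  simp only [Option.getD_some, List.cons.injEq, Prod.mk.injEq, and_true]
  constructor
  · push_cast; ring
  · push_cast; ring
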